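-- pv_equiv track=rewrite | github.com/enricotomasi/GeeksforGeeks_problems | Easy/Last Match.py | findLastOccurence
-- ===== SOURCE A (Python) =====
-- def findLastOccurence(A, B):
--     # code here
--     na = len(A)
--     nb = len(B)
--
--     ans = -1
--
--     for i in range(na):
--         trovato = False
--         if A[i] == B[0] and i+nb <= na:
--             trovato = True
--             k = 1
--             for j in range(i+1, i+nb):
--                 if A[j] != B[k]:
--                     trovato = False
--                     break
--                 k += 1
--         if trovato == True:
--             ans = i+1
--
--     return ans
-- ===== SOURCE B (Python) =====
-- def findLastOccurence(A, B):
--     i = A.rfind(B)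
--     return i + 1 if i >= 0 else -1
-- ===== Notes on version B (the rewrite author's own statement) =====
-- stated objective: faster
-- what changed: Replaces the nested forward scan that re-checks every candidate start with a single right-to-left search for the first (= last) match via str.rfind, returning as soon as one is found.
-- outside the precondition, e.g. on findLastOccurence('ab', ''): A raises IndexError, B returns 3; on findLastOccurence('', ''): A returns -1, B returns 1
import Mathlib
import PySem

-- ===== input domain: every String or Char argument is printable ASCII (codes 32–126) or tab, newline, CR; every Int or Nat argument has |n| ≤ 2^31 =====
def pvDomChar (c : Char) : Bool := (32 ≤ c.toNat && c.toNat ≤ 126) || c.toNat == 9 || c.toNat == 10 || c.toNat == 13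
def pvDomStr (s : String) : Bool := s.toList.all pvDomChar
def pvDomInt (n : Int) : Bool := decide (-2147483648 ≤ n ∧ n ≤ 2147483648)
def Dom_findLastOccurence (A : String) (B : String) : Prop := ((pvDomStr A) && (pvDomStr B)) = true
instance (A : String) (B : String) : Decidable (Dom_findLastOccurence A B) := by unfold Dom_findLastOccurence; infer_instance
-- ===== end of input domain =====

-- B replaces A's nested forward scan by a single right-to-left search for the
-- first (= last) occurrence (Python str.rfind), returning as soon as it matches.

-- ===== PORT A =====
-- inner loop `for j in range(i+1, i+nb)` with break; fuel = number of remaining iterations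
def pvInnerA (la lb : List Char) : Nat → Nat → Nat → Bool
  | _, _, 0 => true
  | j, k, n+1 =>
      if la.getD j ' ' ≠ lb.getD k ' ' then false
      else pvInnerA la lb (j+1) (k+1) n

-- outer loop `for i in range(na)`, carrying ans; fuel = remaining iterations
def pvOuterA (la lb : List Char) (na nb : Nat) : Nat → Int → Nat → Int
  | _, ans, 0 => ans
  | i, ans, n+1 =>
      let trovato :=
        if la.getD i ' ' = lb.getD 0 ' ' ∧ i + nb ≤ na then pvInnerA la lb (i+1) 1 (nb-1)
        else false
      pvOuterA la lb na nb (i+1) (if trovato then (i : Int) + 1 else ans) n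

def findLastOccurence (A : String) (B : String) : Int :=
  let la := A.toList
  let lb := B.toList
  pvOuterA la lb la.length lb.length 0 (-1) la.length

-- ===== PORT B =====
-- hand port of str.rfind: scan candidate starts from na-nb down to 0,
-- return the first index whose slice A[t:t+nb] equals B (slice = drop/take for 0 ≤ t)
def pvRFind (la lb : List Char) : Nat → Int
  | 0 => if (la.drop 0).take lb.length = lb then 0 else -1
  | t+1 => if (la.drop (t+1)).take lb.length = lb then (t : Int) + 1 else pvRFind la lb t

def findLastOccurence_alt (A : String) (B : String) : Int :=
  let la := A.toList
  let lb := B.toList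
  let i : Int := if lb.length ≤ la.length then pvRFind la lb (la.length - lb.length) else -1
  if i ≥ 0 then i + 1 else -1

-- ===== PRECONDITION & SPEC =====
-- Pre_ excludes only B = "": there A raises IndexError on B[0] for every nonempty A, and the
-- one returning case A = "" (loop never runs, A returns -1) is a defensible empty-pattern corner
-- where B follows rfind's convention (empty pattern matches at the end).
def Pre_findLastOccurence (A : String) (B : String) : Prop := B ≠ ""
instance (A : String) (B : String) : Decidable (Pre_findLastOccurence A B) := by unfold Pre_findLastOccurence; infer_instance
def pvWitness_findLastOccurence : String × String := ("abcab", "ab")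

def Spec_findLastOccurence (A : String) (B : String) (out : Int) : Prop := out = findLastOccurence_alt A B
instance (A : String) (B : String) (out : Int) : Decidable (Spec_findLastOccurence A B out) := by unfold Spec_findLastOccurence; infer_instance

-- ===== CLAIM (what is proved, stated in full; the proofs are below) =====
def Claim_equal_findLastOccurence : Prop := ∀ (A : String) (B : String), Dom_findLastOccurence A B → Pre_findLastOccurence A B → Spec_findLastOccurence A B (findLastOccurence A B)

-- ===== LEMMAS AND PROOFS =====

-- common abstraction: last match index + 1 among [i, i+n), scanned upward with accumulator
def pvLast (la lb : List Char) : Nat → Int → Nat → Int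
  | _, ans, 0 => ans
  | i, ans, n+1 =>
      pvLast la lb (i+1) (if (la.drop i).take lb.length = lb then (i : Int) + 1 else ans) n

theorem pvInnerA_iff (la lb : List Char) :
    ∀ (n j k : Nat), pvInnerA la lb j k n = true ↔
      ∀ m < n, la.getD (j+m) ' ' = lb.getD (k+m) ' ' := by
  intro n
  induction n with
  | zero => intro j k; simp [pvInnerA]
  | succ n ih =>
      intro j k
      by_cases h : la.getD j ' ' = lb.getD k ' '
      · simp only [pvInnerA]
        rw [if_neg (fun hn => hn h), ih (j+1) (k+1)]
        constructor
        · intro hm m hmn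
          cases m with
          | zero => simpa using h
          | succ m =>
              have := hm m (by omega)
              rw [show j + (m+1) = j + 1 + m from by omega, show k + (m+1) = k + 1 + m from by omega]
              exact this
        · intro hm m hmn
          have := hm (m+1) (by omega)
          rw [show j + 1 + m = j + (m+1) from by omega, show k + 1 + m = k + (m+1) from by omega]
          exact this
      · simp only [pvInnerA]
        rw [if_pos h]
        constructor
        · intro hf; exact absurd hf (by simp)
        · intro hm
          have := hm 0 (by omega)
          simp only [Nat.add_zero] at this
          exact absurd this h

theorem slice_iff (la lb : List Char) (hlb : lb ≠ []) (i : Nat) :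
    (la.drop i).take lb.length = lb ↔
      (i + lb.length ≤ la.length ∧ ∀ m < lb.length, la.getD (i+m) ' ' = lb.getD m ' ') := by
  have hnb : 0 < lb.length := List.length_pos_iff.mpr hlb
  constructor
  · intro h
    have hlen := congrArg List.length h
    simp [List.length_take, List.length_drop] at hlen
    have hle : i + lb.length ≤ la.length := by omega
    refine ⟨hle, ?_⟩
    intro m hm
    have h1 : i + m < la.length := by omega
    rw [List.getD_eq_getElem la ' ' h1, List.getD_eq_getElem lb ' ' hm]
    have hmlt : m < ((la.drop i).take lb.length).length := by
      simp [List.length_take, List.length_drop]; omega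
    have h2 := List.getElem_of_eq h hmlt
    simpa [List.getElem_take, List.getElem_drop] using h2
  · rintro ⟨hle, hm⟩
    apply List.ext_getElem
    · simp [List.length_take, List.length_drop]; omega
    · intro m hm1 hm2
      have h1 : i + m < la.length := by omega
      have := hm m hm2
      rw [List.getD_eq_getElem la ' ' h1, List.getD_eq_getElem lb ' ' hm2] at this
      simpa [List.getElem_take, List.getElem_drop] using this

-- A's per-iteration test equals the slice test
theorem trovato_eq (la lb : List Char) (hlb : lb ≠ []) (i : Nat) :
    (if la.getD i ' ' = lb.getD 0 ' ' ∧ i + lb.length ≤ la.length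
      then pvInnerA la lb (i+1) 1 (lb.length - 1) else false)
    = decide ((la.drop i).take lb.length = lb) := by
  have hnb : 0 < lb.length := List.length_pos_iff.mpr hlb
  by_cases hg : la.getD i ' ' = lb.getD 0 ' ' ∧ i + lb.length ≤ la.length
  · rw [if_pos hg]
    rcases hg with ⟨h0, hle⟩
    by_cases hs : (la.drop i).take lb.length = lb
    · simp only [hs, decide_true]
      rw [pvInnerA_iff]
      intro m hmn
      have := ((slice_iff la lb hlb i).mp hs).2 (m+1) (by omega)
      simpa [Nat.add_comm, Nat.add_assoc, Nat.add_left_comm] using this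
    · simp only [hs, decide_false]
      by_contra hc
      simp only [Bool.not_eq_false] at hc
      rw [pvInnerA_iff] at hc
      apply hs
      rw [slice_iff la lb hlb i]
      refine ⟨hle, ?_⟩
      intro m hm
      cases m with
      | zero => simpa using h0
      | succ m =>
          have := hc m (by omega)
          simpa [Nat.add_comm, Nat.add_assoc, Nat.add_left_comm] using this
  · rw [if_neg hg]
    symm
    simp only [decide_eq_false_iff_not]
    intro hs
    apply hg
    have h := (slice_iff la lb hlb i).mp hs
    refine ⟨?_, h.1⟩
    have := h.2 0 hnb
    simpa using this

theorem pvOuterA_eq_pvLast (la lb : List Char) (hlb : lb ≠ []) :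
    ∀ (n i : Nat) (ans : Int),
      pvOuterA la lb la.length lb.length i ans n = pvLast la lb i ans n := by
  intro n
  induction n with
  | zero => intro i ans; rfl
  | succ n ih =>
      intro i ans
      simp only [pvOuterA, pvLast]
      rw [trovato_eq la lb hlb i, ih]
      by_cases hs : (la.drop i).take lb.length = lb
      · simp [hs]
      · simp [hs]

theorem pvLast_snoc (la lb : List Char) :
    ∀ (n i : Nat) (ans : Int),
      pvLast la lb i ans (n+1)
        = if (la.drop (i+n)).take lb.length = lb then ((i+n : Nat) : Int) + 1
          else pvLast la lb i ans n := by
  intro n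
  induction n with
  | zero => intro i ans; simp [pvLast]
  | succ n ih =>
      intro i ans
      rw [show pvLast la lb i ans (n+1+1)
            = pvLast la lb (i+1) (if (la.drop i).take lb.length = lb then (i : Int) + 1 else ans) (n+1)
          from rfl]
      rw [ih]
      rw [show pvLast la lb i ans (n+1)
            = pvLast la lb (i+1) (if (la.drop i).take lb.length = lb then (i : Int) + 1 else ans) n
          from rfl]
      have : i + 1 + n = i + (n+1) := by omega
      rw [this]

theorem pvRFind_eq_pvLast (la lb : List Char) :
    ∀ t : Nat,
      (if pvRFind la lb t ≥ 0 then pvRFind la lb t + 1 else -1) = pvLast la lb 0 (-1) (t+1) := by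
  intro t
  induction t with
  | zero =>
      by_cases hs : la.take lb.length = lb <;>
        norm_num [pvRFind, pvLast, List.drop_zero, hs]
  | succ t ih =>
      rw [pvLast_snoc]
      simp only [pvRFind, Nat.zero_add]
      by_cases hs : (la.drop (t+1)).take lb.length = lb
      · rw [if_pos hs, if_pos hs]
        rw [if_pos (by positivity)]
        push_cast; ring
      · rw [if_neg hs, if_neg hs, ih]

theorem pvLast_stable (la lb : List Char) (t : Nat)
    (hf : ∀ j, t ≤ j → ¬ (la.drop j).take lb.length = lb) :
    ∀ k, pvLast la lb 0 (-1) (t + k) = pvLast la lb 0 (-1) t := by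
  intro k
  induction k with
  | zero => rfl
  | succ k ih =>
      have h2 : t + (k+1) = (t + k) + 1 := by omega
      rw [h2, pvLast_snoc]
      rw [if_neg (hf (0 + (t + k)) (by omega))]
      exact ih

theorem pvLast_allfalse (la lb : List Char)
    (hf : ∀ j, ¬ (la.drop j).take lb.length = lb) :
    ∀ (n i : Nat) (ans : Int), pvLast la lb i ans n = ans := by
  intro n
  induction n with
  | zero => intro i ans; rfl
  | succ n ih =>
      intro i ans
      simp only [pvLast]
      rw [if_neg (hf i), ih]

theorem no_match_short (la lb : List Char) (hlb : lb ≠ []) (j : Nat)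
    (h : la.length < j + lb.length) : ¬ (la.drop j).take lb.length = lb := by
  have hnb : 0 < lb.length := List.length_pos_iff.mpr hlb
  intro hs
  have := congrArg List.length hs
  simp [List.length_take, List.length_drop] at this
  omega

-- ===== VERDICT (by name: the statement is the Claim_ definition above) =====
theorem findLastOccurence_spec : Claim_equal_findLastOccurence := by
  intro A B _ hpre
  unfold Spec_findLastOccurence findLastOccurence findLastOccurence_alt
  dsimp only
  have hlb : B.toList ≠ [] := by
    intro h
    apply hpre
    have h2 : B.toList = "".toList := by simpa using h
    exact String.toList_inj.mp h2
  set la := A.toList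
  set lb := B.toList
  rw [pvOuterA_eq_pvLast la lb hlb]
  have hnb : 0 < lb.length := List.length_pos_iff.mpr hlb
  by_cases hle : lb.length ≤ la.length
  · rw [if_pos hle]
    set t := la.length - lb.length with ht
    have hf : ∀ j, t + 1 ≤ j → ¬ (la.drop j).take lb.length = lb := by
      intro j hj
      exact no_match_short la lb hlb j (by omega)
    have h1 : la.length = (t + 1) + (la.length - (t + 1)) := by omega
    rw [h1, pvLast_stable la lb (t+1) hf (la.length - (t+1))]
    exact (pvRFind_eq_pvLast la lb t).symm
  · rw [if_neg hle]
    rw [pvLast_allfalse la lb (fun j => no_match_short la lb hlb j (by omega))]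
    norm_num
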